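-- pv_equiv track=rewrite | github.com/KentChun33333/deep-fake-detection | model.py | _get_num_truncated_layers
-- ===== SOURCE A (Python) =====
-- def _get_num_truncated_layers(num_to_trunc, layer_size, initial_layer_size=1):
--     num = 0
--     if num_to_trunc > 0:
--         num += initial_layer_size
--         num_to_trunc -= 1
--     while num_to_trunc > 0:
--         num += layer_size
--         num_to_trunc -= 1
--     return -num
-- ===== SOURCE B (Python) =====
-- def _get_num_truncated_layers(num_to_trunc, layer_size, initial_layer_size=1):
--     if num_to_trunc > 0:
--         return -(initial_layer_size + (num_to_trunc - 1) * layer_size)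
--     return 0
-- ===== Notes on version B (the rewrite author's own statement) =====
-- stated objective: faster
-- what changed: Replaces the decrement-and-accumulate while loop with the closed-form sum -(initial_layer_size + (num_to_trunc-1)*layer_size) for positive counts, 0 otherwise.
import Mathlib
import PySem

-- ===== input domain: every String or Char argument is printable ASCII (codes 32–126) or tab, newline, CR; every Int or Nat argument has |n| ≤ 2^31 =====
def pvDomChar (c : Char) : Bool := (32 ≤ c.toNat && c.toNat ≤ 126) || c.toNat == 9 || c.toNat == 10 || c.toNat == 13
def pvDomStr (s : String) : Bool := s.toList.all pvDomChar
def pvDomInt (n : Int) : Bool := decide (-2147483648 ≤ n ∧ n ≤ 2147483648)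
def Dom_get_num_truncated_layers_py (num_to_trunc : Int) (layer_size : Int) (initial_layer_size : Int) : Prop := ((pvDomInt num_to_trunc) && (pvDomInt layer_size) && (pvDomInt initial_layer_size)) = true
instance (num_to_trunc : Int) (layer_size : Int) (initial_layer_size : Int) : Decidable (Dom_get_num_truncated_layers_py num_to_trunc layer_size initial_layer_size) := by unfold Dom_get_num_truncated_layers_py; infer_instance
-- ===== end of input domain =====

-- B replaces A's decrement-and-accumulate while loop by the closed-form sum (objective: faster, O(1)).

-- ===== PORT A =====
-- the 'while num_to_trunc > 0' loop, with fuel = the number of remaining iterations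
def pvWhileA (fuel : Nat) (layer_size : Int) (num : Int) : Int :=
  match fuel with
  | 0 => num
  | k + 1 => pvWhileA k layer_size (num + layer_size)

def get_num_truncated_layers_py (num_to_trunc : Int) (layer_size : Int) (initial_layer_size : Int) : Int :=
  if num_to_trunc > 0 then
    -(pvWhileA (num_to_trunc - 1).toNat layer_size initial_layer_size)
  else
    -(0 : Int)

-- ===== PORT B =====
def get_num_truncated_layers_py_alt (num_to_trunc : Int) (layer_size : Int) (initial_layer_size : Int) : Int :=
  if num_to_trunc > 0 then -(initial_layer_size + (num_to_trunc - 1) * layer_size) else 0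

-- ===== PRECONDITION & SPEC =====
def Spec_get_num_truncated_layers_py (num_to_trunc : Int) (layer_size : Int) (initial_layer_size : Int) (out : Int) : Prop := out = get_num_truncated_layers_py_alt num_to_trunc layer_size initial_layer_size
instance (num_to_trunc : Int) (layer_size : Int) (initial_layer_size : Int) (out : Int) : Decidable (Spec_get_num_truncated_layers_py num_to_trunc layer_size initial_layer_size out) := by unfold Spec_get_num_truncated_layers_py; infer_instance

-- ===== CLAIM (what is proved, stated in full; the proofs are below) =====
def Claim_equal_get_num_truncated_layers_py : Prop := ∀ (num_to_trunc : Int) (layer_size : Int) (initial_layer_size : Int), Dom_get_num_truncated_layers_py num_to_trunc layer_size initial_layer_size → Spec_get_num_truncated_layers_py num_to_trunc layer_size initial_layer_size (get_num_truncated_layers_py num_to_trunc layer_size initial_layer_size)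

-- ===== LEMMAS AND PROOFS =====
theorem pvWhileA_eq (fuel : Nat) (layer_size num : Int) :
    pvWhileA fuel layer_size num = num + (fuel : Int) * layer_size := by
  induction fuel generalizing num with
  | zero => simp [pvWhileA]
  | succ k ih => simp [pvWhileA, ih]; push_cast; ring

-- ===== VERDICT (by name: the statement is the Claim_ definition above) =====
theorem get_num_truncated_layers_py_spec : Claim_equal_get_num_truncated_layers_py := by
  intro n l i _
  unfold Spec_get_num_truncated_layers_py get_num_truncated_layers_py get_num_truncated_layers_py_alt
  split_ifs with h
  · rw [pvWhileA_eq, Int.toNat_of_nonneg (by omega)]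
  · simp
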